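-- pv_equiv track=rewrite | github.com/PochariChun/112_DS-exam-practice | DS_final/PN_bubblesorting_onlycount.py | license_plate_value
-- ===== SOURCE A (Python) =====
-- def license_plate_value(plate):
--     """ 將車牌轉換為數值以便排序 """
--     value = 0
--     for char in plate:
--         if 'A' <= char <= 'Z':  # 如果字元是大寫字母
--             value = value * 52 + ord(char) - ord('A')
--         else:  # 如果字元是小寫字母
--             value = value * 52 + ord(char) - ord('a') + 26
--     return value
-- ===== SOURCE B (Python) =====
-- def license_plate_value(plate):
--     """ 將車牌轉換為數值以便排序 """
--     def digit(c):
--         if 'A' <= c <= 'Z':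
--             return ord(c) - ord('A')
--         return ord(c) - ord('a') + 26
--     total = 0
--     weight = 1
--     for c in reversed(plate):
--         total += digit(c) * weight
--         weight *= 52
--     return total
-- ===== Notes on version B (the rewrite author's own statement) =====
-- stated objective: alternative
-- what changed: Replaces A's left-to-right Horner fold with a right-to-left pass that keeps an explicit place-value weight (weight *= 52) and adds digit*weight for each character.
import Mathlib
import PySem

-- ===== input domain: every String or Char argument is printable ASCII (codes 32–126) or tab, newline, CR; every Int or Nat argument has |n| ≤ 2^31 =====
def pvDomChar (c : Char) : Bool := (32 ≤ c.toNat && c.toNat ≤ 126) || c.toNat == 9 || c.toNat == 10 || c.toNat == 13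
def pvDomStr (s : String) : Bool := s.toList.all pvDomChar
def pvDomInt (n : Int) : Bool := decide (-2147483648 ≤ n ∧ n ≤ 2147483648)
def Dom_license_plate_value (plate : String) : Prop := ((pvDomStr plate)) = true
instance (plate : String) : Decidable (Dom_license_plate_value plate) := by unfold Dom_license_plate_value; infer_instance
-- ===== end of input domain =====

-- B replaces A's left-to-right Horner fold by a right-to-left pass with an explicit place-value weight (alternative decomposition, same cost).


-- ===== PORT A =====
-- A: value = 0; for char in plate: Horner step (branch on uppercase).
def license_plate_value (plate : String) : Int :=
  plate.toList.foldl
    (fun value char =>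
      if 'A' ≤ char ∧ char ≤ 'Z' then value * 52 + (char.toNat : Int) - 65
      else value * 52 + (char.toNat : Int) - 97 + 26)
    0

-- ===== PORT B =====
-- B's digit helper: ord(c)-ord('A') for uppercase, else ord(c)-ord('a')+26.
def lpvDigit (c : Char) : Int :=
  if 'A' ≤ c ∧ c ≤ 'Z' then (c.toNat : Int) - 65
  else (c.toNat : Int) - 97 + 26

-- B: total = 0, weight = 1; for c in reversed(plate): total += digit(c)*weight; weight *= 52.
def license_plate_value_alt (plate : String) : Int :=
  (plate.toList.reverse.foldl
    (fun (st : Int × Int) c => (st.1 + lpvDigit c * st.2, st.2 * 52))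
    (0, 1)).1

-- ===== PRECONDITION & SPEC =====
def Spec_license_plate_value (plate : String) (out : Int) : Prop := out = license_plate_value_alt plate
instance (plate : String) (out : Int) : Decidable (Spec_license_plate_value plate out) := by unfold Spec_license_plate_value; infer_instance

-- ===== CLAIM (what is proved, stated in full; the proofs are below) =====
def Claim_equal_license_plate_value : Prop := ∀ (plate : String), Dom_license_plate_value plate → Spec_license_plate_value plate (license_plate_value plate)

-- ===== LEMMAS AND PROOFS =====

-- A's Horner fold from accumulator v equals v·52^|l| plus the fold from 0.
theorem lpv_shift (l : List Char) (v : Int) :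
    l.foldl
      (fun value char =>
        if 'A' ≤ char ∧ char ≤ 'Z' then value * 52 + (char.toNat : Int) - 65
        else value * 52 + (char.toNat : Int) - 97 + 26)
      v
    = v * 52 ^ l.length
      + l.foldl
          (fun value char =>
            if 'A' ≤ char ∧ char ≤ 'Z' then value * 52 + (char.toNat : Int) - 65
            else value * 52 + (char.toNat : Int) - 97 + 26)
          0 := by
  induction l generalizing v with
  | nil => simp
  | cons c t ih =>
    rw [List.foldl_cons, List.foldl_cons, ih, ih (if 'A' ≤ c ∧ c ≤ 'Z' then 0 * 52 + (c.toNat : Int) - 65 else 0 * 52 + (c.toNat : Int) - 97 + 26)]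
    split_ifs with h <;> (simp [pow_succ]; ring)

-- B's right-to-left weighted pass from state (t, w) computes (t + w·A(l), w·52^|l|).
theorem lpv_rev (l : List Char) (t w : Int) :
    l.reverse.foldl
      (fun (st : Int × Int) c => (st.1 + lpvDigit c * st.2, st.2 * 52)) (t, w)
    = (t + w * l.foldl
          (fun value char =>
            if 'A' ≤ char ∧ char ≤ 'Z' then value * 52 + (char.toNat : Int) - 65
            else value * 52 + (char.toNat : Int) - 97 + 26)
          0,
       w * 52 ^ l.length) := by
  induction l generalizing t w with
  | nil => simp
  | cons c r ih =>
    rw [List.reverse_cons, List.foldl_append, ih]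
    simp only [List.foldl_cons, List.foldl_nil, List.length_cons]
    unfold lpvDigit
    rw [Prod.mk.injEq]
    split_ifs with h
    · rw [lpv_shift r (0 * 52 + (c.toNat : Int) - 65)]
      constructor <;> (simp [pow_succ]; ring)
    · rw [lpv_shift r (0 * 52 + (c.toNat : Int) - 97 + 26)]
      constructor <;> (simp [pow_succ]; ring)

-- ===== VERDICT (by name: the statement is the Claim_ definition above) =====
theorem license_plate_value_spec : Claim_equal_license_plate_value := by
  intro plate _
  unfold Spec_license_plate_value license_plate_value license_plate_value_alt
  rw [lpv_rev]
  simp
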